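-- pv_equiv track=rewrite | github.com/PBillodeau/advent-of-code-2020 | 8-eight/eight.py | flip_command
-- ===== SOURCE A (Python) =====
-- def flip_command(testCommands, addr):
--
--     if testCommands[addr][:3] == 'nop':
--         testCommands[addr] = testCommands[addr].replace('nop', 'jmp')
--     elif testCommands[addr][:3] == 'jmp':
--         testCommands[addr] = testCommands[addr].replace('jmp', 'nop')
--     else:
--         addr += 1
--         [testCommands, addr] = flip_command(testCommands, addr)
--
--     return [testCommands, addr]
-- ===== SOURCE B (Python) =====
-- def flip_command(testCommands, addr):
--     # Find the first nop/jmp instruction at or after addr, then flip it once.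
--     addr = next(i for i in range(addr, len(testCommands))
--                 if testCommands[i][:3] in ('nop', 'jmp'))
--     op = testCommands[addr][:3]
--     swap = 'jmp' if op == 'nop' else 'nop'
--     testCommands[addr] = testCommands[addr].replace(op, swap)
--     return [testCommands, addr]
-- ===== Notes on version B (the rewrite author's own statement) =====
-- stated objective: idiomatic
-- what changed: Replaces the tail recursion by a single next()-over-range search for the first nop/jmp index followed by one table-free flip of that entry, instead of re-testing and re-flipping inside each recursive call.
-- outside the precondition, e.g. on flip_command(['acc +1'], 0): A raises IndexError, B raises StopIteration
import Mathlib
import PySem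

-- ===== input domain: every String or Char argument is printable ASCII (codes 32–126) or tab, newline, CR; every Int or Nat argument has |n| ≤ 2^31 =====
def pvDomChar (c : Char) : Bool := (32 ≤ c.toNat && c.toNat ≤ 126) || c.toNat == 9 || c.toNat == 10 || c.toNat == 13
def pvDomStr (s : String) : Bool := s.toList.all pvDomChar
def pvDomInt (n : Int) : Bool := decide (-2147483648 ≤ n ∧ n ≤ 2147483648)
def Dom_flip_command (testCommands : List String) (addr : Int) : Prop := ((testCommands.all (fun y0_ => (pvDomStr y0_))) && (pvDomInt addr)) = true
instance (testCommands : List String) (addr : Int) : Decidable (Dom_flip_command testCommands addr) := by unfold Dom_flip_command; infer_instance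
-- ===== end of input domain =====

-- B replaces A's tail recursion by a search for the first nop/jmp index, then one flip (idiomatic).
-- Both A and B mutate testCommands in place in Python; the equivalence proved here is about the return value.

-- ===== PORT A =====
def flip_command (testCommands : List String) (addr : Int) : List String × Int :=
  match h : PySem.List.pyGet? testCommands addr with
  | none => (testCommands, addr)   -- Python raises IndexError here; excluded by Pre_
  | some s =>
    if PySem.Str.slice s none (some 3) == "nop" then
      (PySem.List.pySetD testCommands addr (PySem.Str.replace s "nop" "jmp"), addr)
    else if PySem.Str.slice s none (some 3) == "jmp" then
      (PySem.List.pySetD testCommands addr (PySem.Str.replace s "jmp" "nop"), addr)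
    else
      flip_command testCommands (addr + 1)
termination_by ((testCommands.length : Int) - addr).toNat
decreasing_by
  have hin : PySem.Raise.InRange testCommands.length addr := by
    by_contra hc
    rw [← PySem.List.pyGet?_eq_none_iff (xs := testCommands) (i := addr)] at hc
    simp [hc] at h
  rcases hin with ⟨_, h2⟩
  omega

-- ===== PORT B =====
-- the generator condition: testCommands[i][:3] in ('nop', 'jmp')
def pvIsFlip (testCommands : List String) (i : Int) : Bool :=
  PySem.Str.slice (PySem.List.pyGetD testCommands i "") none (some 3) == "nop" ||
  PySem.Str.slice (PySem.List.pyGetD testCommands i "") none (some 3) == "jmp"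

def flip_command_alt (testCommands : List String) (addr : Int) : List String × Int :=
  match (PySem.List.pyRange addr testCommands.length 1).find? (pvIsFlip testCommands) with
  | none => (testCommands, addr)   -- Python's next() raises here; excluded by Pre_
  | some i =>
    let op := PySem.Str.slice (PySem.List.pyGetD testCommands i "") none (some 3)
    let swap := if op == "nop" then "jmp" else "nop"
    (PySem.List.pySetD testCommands i
       (PySem.Str.replace (PySem.List.pyGetD testCommands i "") op swap), i)

-- ===== PRECONDITION & SPEC =====
-- Pre_ excludes exactly the inputs where A raises: addr below -len (immediate IndexError),
-- or no instruction at index ≥ addr starts with 'nop'/'jmp' (the scan runs past the end).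
def Pre_flip_command (testCommands : List String) (addr : Int) : Prop :=
  -(testCommands.length : Int) ≤ addr ∧
  (PySem.List.pyRange addr testCommands.length 1).any (pvIsFlip testCommands) = true
instance (testCommands : List String) (addr : Int) : Decidable (Pre_flip_command testCommands addr) := by unfold Pre_flip_command; infer_instance

def pvWitness_flip_command : List String × Int := (["acc +1", "jmp -2"], 0)

def Spec_flip_command (testCommands : List String) (addr : Int) (out : List String × Int) : Prop := out = flip_command_alt testCommands addr
instance (testCommands : List String) (addr : Int) (out : List String × Int) : Decidable (Spec_flip_command testCommands addr out) := by unfold Spec_flip_command; infer_instance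

-- ===== CLAIM (what is proved, stated in full; the proofs are below) =====
def Claim_equal_flip_command : Prop := ∀ (testCommands : List String) (addr : Int), Dom_flip_command testCommands addr → Pre_flip_command testCommands addr → Spec_flip_command testCommands addr (flip_command testCommands addr)

-- ===== LEMMAS AND PROOFS =====

theorem getD_of_get? {α : Type} (xs : List α) (i : Int) (d s : α)
    (h : PySem.List.pyGet? xs i = some s) : PySem.List.pyGetD xs i d = s := by
  simp [PySem.List.pyGetD, h]

theorem flip_command_main (testCommands : List String) (addr : Int)
    (hpre : Pre_flip_command testCommands addr) :
    flip_command testCommands addr = flip_command_alt testCommands addr := by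
  fun_induction flip_command testCommands addr
  case case1 addr h =>
    exfalso
    obtain ⟨h1, hany⟩ := hpre
    have hout : ¬ PySem.Raise.InRange testCommands.length addr :=
      (PySem.List.pyGet?_eq_none_iff _ _).mp h
    simp [PySem.Raise.InRange] at hout
    rw [PySem.List.pyRange_one_eq_nil (by omega)] at hany
    simp at hany
  case case2 addr s h hnop =>
    have hin : PySem.Raise.InRange testCommands.length addr := by
      by_contra hc
      rw [(PySem.List.pyGet?_eq_none_iff _ _).mpr hc] at h
      simp at h
    obtain ⟨hlo, hhi⟩ := hin
    have hs3 : PySem.Str.slice s none (some 3) = "nop" := by simpa using hnop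
    have hd := getD_of_get? testCommands addr "" s h
    have hflip : pvIsFlip testCommands addr = true := by simp [pvIsFlip, hd, hs3]
    simp only [flip_command_alt]
    rw [PySem.List.pyRange_one_cons hhi, List.find?_cons_of_pos hflip]
    simp [hd, hs3]
  case case3 addr s h hnop hjmp =>
    have hin : PySem.Raise.InRange testCommands.length addr := by
      by_contra hc
      rw [(PySem.List.pyGet?_eq_none_iff _ _).mpr hc] at h
      simp at h
    obtain ⟨hlo, hhi⟩ := hin
    have hs3 : PySem.Str.slice s none (some 3) = "jmp" := by simpa using hjmp
    have hd := getD_of_get? testCommands addr "" s h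
    have hflip : pvIsFlip testCommands addr = true := by simp [pvIsFlip, hd, hs3]
    simp only [flip_command_alt]
    rw [PySem.List.pyRange_one_cons hhi, List.find?_cons_of_pos hflip]
    simp [hd, hs3]
  case case4 addr s h hnop hjmp ih =>
    have hin : PySem.Raise.InRange testCommands.length addr := by
      by_contra hc
      rw [(PySem.List.pyGet?_eq_none_iff _ _).mpr hc] at h
      simp at h
    obtain ⟨hlo, hhi⟩ := hin
    have hd := getD_of_get? testCommands addr "" s h
    have e1 : PySem.Str.slice s none (some 3) ≠ "nop" := fun e => hnop (by simp [e])
    have e2 : PySem.Str.slice s none (some 3) ≠ "jmp" := fun e => hjmp (by simp [e])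
    have hflip : pvIsFlip testCommands addr = false := by simp [pvIsFlip, hd, e1, e2]
    have hpre' : Pre_flip_command testCommands (addr + 1) := by
      obtain ⟨h1, hany⟩ := hpre
      refine ⟨by omega, ?_⟩
      rw [PySem.List.pyRange_one_cons hhi] at hany
      simpa [hflip] using hany
    rw [ih hpre']
    have hsome : ((PySem.List.pyRange (addr + 1) testCommands.length 1).find?
        (pvIsFlip testCommands)).isSome := by
      rw [List.find?_isSome]
      simpa [List.any_eq_true] using hpre'.2
    obtain ⟨v, hv⟩ := Option.isSome_iff_exists.mp hsome
    simp only [flip_command_alt]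
    rw [PySem.List.pyRange_one_cons hhi, List.find?_cons_of_neg (by simp [hflip]), hv]

-- ===== VERDICT (by name: the statement is the Claim_ definition above) =====
theorem flip_command_spec : Claim_equal_flip_command := by
  intro tc addr _ hpre
  exact flip_command_main tc addr hpre
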